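-- pv_equiv track=rewrite | github.com/GINOXCVIII/SSL_TP_2019 | lexer.py | char_Automaton
-- ===== SOURCE A (Python) =====
-- TRAP_RESULT = "TRAP"
--
-- ACCEPT_RESULT = "ACCEPT"
--
-- NOACCEPT_RESULT = "NOT ACCEPT"
--
-- TRAP = -1
--
-- def char_Automaton (string):
-- 	state = 0
-- 	final_state = 1
-- 	for c in string:
-- 		if state == 0 and c.isalpha():
-- 			state = 1
-- 		else:
-- 			state = TRAP
-- 			break
--
-- 	if state == TRAP:
-- 		return TRAP_RESULT
-- 	if state == final_state:
-- 		return ACCEPT_RESULT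
-- 	else:
-- 		if state != TRAP:
-- 			return NOACCEPT_RESULT
-- ===== SOURCE B (Python) =====
-- TRAP_RESULT = "TRAP"
--
-- ACCEPT_RESULT = "ACCEPT"
--
-- NOACCEPT_RESULT = "NOT ACCEPT"
--
-- TRAP = -1
--
-- def char_Automaton(string):
--     # closed-form classification instead of a state-machine scan
--     if string == "":
--         return NOACCEPT_RESULT
--     if len(string) == 1 and string.isalpha():
--         return ACCEPT_RESULT
--     return TRAP_RESULT
-- ===== Notes on version B (the rewrite author's own statement) =====
-- stated objective: simpler
-- what changed: Replaces the character-by-character finite-automaton scan with a direct closed-form classification on the string's length and alphabetic-ness.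
import Mathlib
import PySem

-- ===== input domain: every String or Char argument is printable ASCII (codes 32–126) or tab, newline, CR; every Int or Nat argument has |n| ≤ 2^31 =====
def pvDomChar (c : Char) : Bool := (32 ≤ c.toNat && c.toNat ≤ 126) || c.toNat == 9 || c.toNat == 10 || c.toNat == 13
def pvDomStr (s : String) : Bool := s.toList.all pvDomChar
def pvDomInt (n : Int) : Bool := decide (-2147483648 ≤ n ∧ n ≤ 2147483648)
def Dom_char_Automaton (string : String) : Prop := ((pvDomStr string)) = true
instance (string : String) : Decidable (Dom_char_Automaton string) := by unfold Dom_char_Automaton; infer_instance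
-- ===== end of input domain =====

-- B replaces A's state-machine scan with a closed-form classification on length and alphabetic-ness (objective: simpler).
-- ===== PORT A =====
def char_AutomatonLoop (state : Int) : List Char → Int
  | [] => state
  | c :: rest =>
      if state == 0 && PySem.Chars.isalpha c then char_AutomatonLoop 1 rest
      else -1   -- state = TRAP; break

def char_Automaton (string : String) : String :=
  let state := char_AutomatonLoop 0 string.toList
  if state == -1 then "TRAP"
  else if state == 1 then "ACCEPT"
  else "NOT ACCEPT"

-- ===== PORT B =====
def char_Automaton_alt (string : String) : String :=
  if string == "" then "NOT ACCEPT"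
  else if PySem.Str.len string == 1 && PySem.Str.strIsalpha string then "ACCEPT"
  else "TRAP"

-- ===== PRECONDITION & SPEC =====
def Spec_char_Automaton (string : String) (out : String) : Prop := out = char_Automaton_alt string
instance (string : String) (out : String) : Decidable (Spec_char_Automaton string out) := by unfold Spec_char_Automaton; infer_instance

-- ===== CLAIM (what is proved, stated in full; the proofs are below) =====
def Claim_equal_char_Automaton : Prop := ∀ (string : String), Dom_char_Automaton string → Spec_char_Automaton string (char_Automaton string)

-- ===== LEMMAS AND PROOFS =====

-- ===== VERDICT (by name: the statement is the Claim_ definition above) =====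
theorem char_Automaton_spec : Claim_equal_char_Automaton := by
  intro string _
  unfold Spec_char_Automaton
  cases h : string.toList with
  | nil =>
    have he : string = "" := String.toList_injective (by simpa using h)
    subst he
    rfl
  | cons c rest =>
    have hne : (string == "") = false := by
      simp
      intro he; rw [he] at h; simp at h
    cases rest with
    | nil =>
      simp [char_Automaton, char_Automaton_alt, char_AutomatonLoop, h, hne,
            PySem.Chars.strIsalpha]
      by_cases hc : PySem.Chars.isalpha c = true <;> simp [hc]
    | cons d rest' =>
      simp [char_Automaton, char_Automaton_alt, char_AutomatonLoop, h, hne]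
      intro hh; exfalso; omega
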